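-- pv_equiv track=rewrite | github.com/sreno77/rts_labs | RtsLabs.py | aboveBelow
-- ===== SOURCE A (Python) =====
-- def aboveBelow(nums: list[int], comparison: int) -> dict:
--     above = 0
--     below = 0
--
--     for num in nums:
--         if num > comparison:
--             above += 1
--         elif num < comparison:
--             below += 1
--
--         # no else because we have no specs for num == comparison
--
--     return {'above': above, 'below': below}
-- ===== SOURCE B (Python) =====
-- def _bisect_left(s, x):
--     # leftmost insertion point of x in sorted list s = count of elements < x
--     lo, hi = 0, len(s)
--     while lo < hi:
--         mid = (lo + hi) // 2
--         if s[mid] < x: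
--             lo = mid + 1
--         else:
--             hi = mid
--     return lo
--
--
-- def _bisect_right(s, x):
--     # rightmost insertion point of x in sorted list s = count of elements <= x
--     lo, hi = 0, len(s)
--     while lo < hi:
--         mid = (lo + hi) // 2
--         if s[mid] <= x:
--             lo = mid + 1
--         else:
--             hi = mid
--     return lo
--
--
-- def aboveBelow(nums: list[int], comparison: int) -> dict:
--     s = sorted(nums)
--     below = _bisect_left(s, comparison)
--     above = len(nums) - _bisect_right(s, comparison)
--     return {'above': above, 'below': below}
-- ===== Notes on version B (the rewrite author's own statement) =====
-- stated objective: alternative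
-- what changed: Replaces the element-by-element comparison loop with two counters by sorting a copy of nums once and locating the comparison value with two hand-written binary searches: bisect-left gives the count of strictly smaller elements, len minus bisect-right the count of strictly larger ones, ties falling between the two indices.
import Mathlib
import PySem

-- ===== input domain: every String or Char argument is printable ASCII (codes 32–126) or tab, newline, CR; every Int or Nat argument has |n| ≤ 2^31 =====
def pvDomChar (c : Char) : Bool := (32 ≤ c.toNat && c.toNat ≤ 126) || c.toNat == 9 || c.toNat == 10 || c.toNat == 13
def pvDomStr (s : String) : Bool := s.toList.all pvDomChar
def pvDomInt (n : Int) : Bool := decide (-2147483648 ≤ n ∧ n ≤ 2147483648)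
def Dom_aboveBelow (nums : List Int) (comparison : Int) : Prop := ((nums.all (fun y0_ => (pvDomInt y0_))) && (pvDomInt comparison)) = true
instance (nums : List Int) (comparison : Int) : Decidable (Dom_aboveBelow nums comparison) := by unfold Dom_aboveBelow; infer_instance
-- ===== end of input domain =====

-- B replaces A's per-element comparison loop by sort + two hand-written binary searches
-- (an alternative algorithm, not faster); return value only — neither version mutates nums.

-- ===== PORT A =====
-- A's loop over nums with the two counters (above, below); elif kept as nested if.
def aboveBelow (nums : List Int) (comparison : Int) : List (String × Int) :=
  let st :=
    nums.foldl
      (fun (st : Int × Int) num =>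
        if num > comparison then (st.1 + 1, st.2)
        else if num < comparison then (st.1, st.2 + 1)
        else st)
      (0, 0)
  [("above", st.1), ("below", st.2)]

-- ===== PORT B =====
-- _bisect_left's while-loop; s[mid] as getD: mid = (lo+hi)/2 with lo < hi ≤ len s, so the
-- access is always in range and Python never raises there (exact on every reached index).
def pyBisectLeft (s : List Int) (x : Int) (lo hi : Nat) : Nat :=
  if _h : lo < hi then
    if s.getD ((lo + hi) / 2) 0 < x then pyBisectLeft s x ((lo + hi) / 2 + 1) hi
    else pyBisectLeft s x lo ((lo + hi) / 2)
  else lo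
termination_by hi - lo
decreasing_by all_goals omega

-- _bisect_right's while-loop (condition s[mid] <= x); same in-range remark as above.
def pyBisectRight (s : List Int) (x : Int) (lo hi : Nat) : Nat :=
  if _h : lo < hi then
    if s.getD ((lo + hi) / 2) 0 ≤ x then pyBisectRight s x ((lo + hi) / 2 + 1) hi
    else pyBisectRight s x lo ((lo + hi) / 2)
  else lo
termination_by hi - lo
decreasing_by all_goals omega

def aboveBelow_alt (nums : List Int) (comparison : Int) : List (String × Int) :=
  let s := PySem.List.sorted nums (fun v => v) false
  let below : Int := pyBisectLeft s comparison 0 s.length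
  let above : Int := (nums.length : Int) - pyBisectRight s comparison 0 s.length
  [("above", above), ("below", below)]

-- ===== PRECONDITION & SPEC =====
def Spec_aboveBelow (nums : List Int) (comparison : Int) (out : List (String × Int)) : Prop := out = aboveBelow_alt nums comparison
instance (nums : List Int) (comparison : Int) (out : List (String × Int)) : Decidable (Spec_aboveBelow nums comparison out) := by unfold Spec_aboveBelow; infer_instance

-- ===== CLAIM (what is proved, stated in full; the proofs are below) =====
def Claim_equal_aboveBelow : Prop := ∀ (nums : List Int) (comparison : Int), Dom_aboveBelow nums comparison → Spec_aboveBelow nums comparison (aboveBelow nums comparison)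

-- ===== LEMMAS AND PROOFS =====

-- A's loop accumulates the two strict counts.
lemma foldl_counts (nums : List Int) (c : Int) (a b : Int) :
    nums.foldl
      (fun (st : Int × Int) num =>
        if num > c then (st.1 + 1, st.2)
        else if num < c then (st.1, st.2 + 1)
        else st)
      (a, b)
    = (a + (nums.countP (fun v => decide (c < v)) : Int),
       b + (nums.countP (fun v => decide (v < c)) : Int)) := by
  induction nums generalizing a b with
  | nil => simp
  | cons n t ih =>
      simp only [List.foldl_cons, List.countP_cons]
      by_cases h1 : c < n
      · rw [if_pos (show n > c from h1), ih]
        have h2 : ¬ n < c := by omega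
        simp only [h1, h2, decide_true, decide_false, Prod.mk.injEq]
        constructor <;> push_cast <;> ring
      · by_cases h2 : n < c
        · rw [if_neg (show ¬ n > c from h1), if_pos h2, ih]
          simp only [h1, h2, decide_true, decide_false, Prod.mk.injEq]
          constructor <;> push_cast <;> ring
        · rw [if_neg (show ¬ n > c from h1), if_neg h2, ih]
          simp [h1, h2]

-- If the first n positions satisfy p and the rest do not, countP p = n.
lemma countP_eq_of_prefix (s : List Int) (p : Int → Bool) (n : Nat)
    (hn : n ≤ s.length)
    (h1 : ∀ j, j < n → p (s.getD j 0))
    (h2 : ∀ j, n ≤ j → j < s.length → ¬ p (s.getD j 0)) :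
    s.countP p = n := by
  induction s generalizing n with
  | nil => simp only [List.countP_nil, List.length_nil] at *; omega
  | cons a t ih =>
      cases n with
      | zero =>
          simp only [List.countP_cons]
          have ht : t.countP p = 0 := by
            apply ih 0 (Nat.zero_le _) (by omega)
            intro j _ hj
            exact h2 (j + 1) (by omega) (by simpa using hj)
          have ha : ¬ p a := by simpa using h2 0 (by omega) (by simp)
          simp [ht, ha]
      | succ m =>
          have ha : p a := by simpa using h1 0 (by omega)
          have ht : t.countP p = m := by
            apply ih m (by simpa using hn)
            · intro j hj; exact h1 (j + 1) (by omega)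
            · intro j hj hj2; exact h2 (j + 1) (by omega) (by simpa using hj2)
          simp [ha, ht]

-- sortedness gives positionwise monotonicity (in getD form).
lemma sorted_getD_mono (s : List Int) (hs : s.Pairwise (· ≤ ·))
    {i j : Nat} (hij : i ≤ j) (hj : j < s.length) : s.getD i 0 ≤ s.getD j 0 := by
  rcases Nat.eq_or_lt_of_le hij with rfl | hlt
  · exact le_refl _
  · have := (List.pairwise_iff_getElem.mp hs) i j (by omega) hj hlt
    rw [List.getD_eq_getElem s 0 (by omega), List.getD_eq_getElem s 0 hj]
    exact this

-- The binary-search loop's postcondition: the result splits s at the boundary of p,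
-- for any downward-closed-along-s decidable predicate p (instantiated with (· < x), (· ≤ x)).
lemma bsearch_split (s : List Int) (p : Int → Bool)
    (hmono : ∀ i j : Nat, i ≤ j → j < s.length → p (s.getD j 0) → p (s.getD i 0))
    (f : List Int → Nat → Nat → Nat)
    (hf : ∀ lo hi, f s lo hi =
      if lo < hi then
        (if p (s.getD ((lo + hi) / 2) 0) then f s ((lo + hi) / 2 + 1) hi
         else f s lo ((lo + hi) / 2))
      else lo)
    (lo hi : Nat) (hlo_hi : lo ≤ hi) (hhi : hi ≤ s.length)
    (hL : ∀ j, j < lo → p (s.getD j 0))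
    (hR : ∀ j, hi ≤ j → j < s.length → ¬ p (s.getD j 0)) :
    s.countP p = f s lo hi := by
  induction hn : hi - lo using Nat.strong_induction_on generalizing lo hi with
  | _ n ih =>
    rw [hf]
    by_cases h : lo < hi
    · simp only [if_pos h]
      by_cases hp : p (s.getD ((lo + hi) / 2) 0)
      · simp only [if_pos hp]
        refine ih (hi - ((lo + hi) / 2 + 1)) (by omega) _ _ (by omega) hhi ?_ hR rfl
        intro j hj
        exact hmono j ((lo + hi) / 2) (by omega) (by omega) hp
      · simp only [if_neg hp]
        refine ih ((lo + hi) / 2 - lo) (by omega) _ _ (by omega) (by omega) hL ?_ rfl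
        intro j hj1 hj2 hpj
        exact hp (hmono ((lo + hi) / 2) j (by omega) hj2 hpj)
    · simp only [if_neg h]
      have hlh : lo = hi := by omega
      subst hlh
      exact countP_eq_of_prefix s p lo hhi hL (by simpa using hR)

lemma pyBisectLeft_eq (s : List Int) (x : Int) (hs : s.Pairwise (· ≤ ·)) :
    pyBisectLeft s x 0 s.length = s.countP (fun v => decide (v < x)) := by
  refine (bsearch_split s _ ?_ (fun s lo hi => pyBisectLeft s x lo hi)
    (fun lo hi => by simp only []; rw [pyBisectLeft.eq_def]; simp) 0 s.length (Nat.zero_le _) (le_refl _)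
    (by omega) (by omega)).symm
  intro i j hij hj hpj
  simp only [decide_eq_true_eq] at *
  exact lt_of_le_of_lt (sorted_getD_mono s hs hij hj) hpj

lemma pyBisectRight_eq (s : List Int) (x : Int) (hs : s.Pairwise (· ≤ ·)) :
    pyBisectRight s x 0 s.length = s.countP (fun v => decide (v ≤ x)) := by
  refine (bsearch_split s _ ?_ (fun s lo hi => pyBisectRight s x lo hi)
    (fun lo hi => by simp only []; rw [pyBisectRight.eq_def]; simp) 0 s.length (Nat.zero_le _) (le_refl _)
    (by omega) (by omega)).symm
  intro i j hij hj hpj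
  simp only [decide_eq_true_eq] at *
  exact le_trans (sorted_getD_mono s hs hij hj) hpj

-- ===== VERDICT (by name: the statement is the Claim_ definition above) =====
theorem aboveBelow_spec : Claim_equal_aboveBelow := by
  intro nums c _
  unfold Spec_aboveBelow aboveBelow aboveBelow_alt
  simp only
  set s := PySem.List.sorted nums (fun v => v) false with hsdef
  have hperm : s.Perm nums := PySem.List.sorted_perm nums (fun v => v) false
  have hs : s.Pairwise (· ≤ ·) := by
    simpa using PySem.List.sorted_pairwise nums (fun v => v)
  rw [foldl_counts]
  rw [pyBisectLeft_eq s c hs, pyBisectRight_eq s c hs]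
  have hlt : s.countP (fun v => decide (v < c)) = nums.countP (fun v => decide (v < c)) :=
    hperm.countP_eq _
  have hle : s.countP (fun v => decide (v ≤ c)) = nums.countP (fun v => decide (v ≤ c)) :=
    hperm.countP_eq _
  have hsplit : nums.countP (fun v => decide (v ≤ c)) + nums.countP (fun v => decide (c < v))
      = nums.length := by
    have := List.length_eq_countP_add_countP (l := nums) (p := fun v => decide (v ≤ c))
    have hnot : nums.countP (fun v => ¬ decide (v ≤ c)) = nums.countP (fun v => decide (c < v)) := by
      apply List.countP_congr
      intro v _
      simp [not_le]
    omega
  rw [hlt, hle]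
  simp only [List.cons.injEq, Prod.mk.injEq, and_true, true_and]
  constructor
  · omega
  · ring
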